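-- pv_equiv track=rewrite | github.com/Ka-raS/School-Code | Nam 2 Ky 2 - Lap trinh Python/143. TÍCH CHỮ SỐ - TỔNG CHỮ SỐ.py | product_and_sum
-- ===== SOURCE A (Python) =====
-- import typing
--
-- def product_and_sum(sequence: str) -> typing.Tuple[int, int]:
--     product_even = 1
--     sum_odd = 0
--
--     for i, digit in enumerate(sequence):
--         value = ord(digit) - 48
--         if i % 2 != 0:
--             sum_odd += value
--         elif value:
--             product_even *= value
--
--     return product_even, sum_odd
-- ===== SOURCE B (Python) =====
-- import typing
--
-- def product_and_sum(sequence: str) -> typing.Tuple[int, int]: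
--     product_even = 1
--     sum_odd = 0
--     n = len(sequence)
--     i = 0
--     while i < n:
--         e = ord(sequence[i]) - 48
--         if e:
--             product_even *= e
--         if i + 1 < n:
--             sum_odd += ord(sequence[i + 1]) - 48
--         i += 2
--     return product_even, sum_odd
-- ===== Notes on version B (the rewrite author's own statement) =====
-- stated objective: alternative
-- what changed: Replaces the enumerate loop with its per-element parity branch by a single while loop that advances the index two at a time, handling the even-index character and its odd-index successor in one iteration.
import Mathlib
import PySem

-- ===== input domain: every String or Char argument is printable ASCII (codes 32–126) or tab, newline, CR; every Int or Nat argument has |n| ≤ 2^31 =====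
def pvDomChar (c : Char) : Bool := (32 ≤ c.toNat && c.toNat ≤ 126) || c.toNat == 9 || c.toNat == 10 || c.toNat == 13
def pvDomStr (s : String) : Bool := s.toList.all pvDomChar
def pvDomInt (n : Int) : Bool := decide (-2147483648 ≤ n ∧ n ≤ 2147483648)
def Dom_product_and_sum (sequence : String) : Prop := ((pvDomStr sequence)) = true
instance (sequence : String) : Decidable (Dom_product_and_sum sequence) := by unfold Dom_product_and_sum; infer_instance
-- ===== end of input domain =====

-- B replaces A's enumerate loop with its per-element parity branch by a single while loop
-- stepping the index by 2 (alternative decomposition, same cost).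

-- ===== PORT A =====
-- A: one pass over enumerate(sequence), branching on i % 2; product skips zero values.
def product_and_sum (sequence : String) : Int × Int :=
  (PySem.List.enumerate sequence.toList 0).foldl
    (fun (st : Int × Int) (iv : Int × Char) =>
      let value : Int := (iv.2.toNat : Int) - 48
      if iv.1 % 2 ≠ 0 then (st.1, st.2 + value)
      else if value ≠ 0 then (st.1 * value, st.2)
      else st)
    (1, 0)

-- ===== PORT B =====
-- while i < n: handle sequence[i] (even position) and, if present, sequence[i+1]; i += 2.
-- sequence[i]/sequence[i+1] are ported as getD: the loop guard keeps both indices in range.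
def pasGo (chars : List Char) (product_even sum_odd : Int) (i : Nat) : Int × Int :=
  if i < chars.length then
    let e : Int := ((chars.getD i ' ').toNat : Int) - 48
    let p := if e ≠ 0 then product_even * e else product_even
    let s := if i + 1 < chars.length then
               sum_odd + (((chars.getD (i + 1) ' ').toNat : Int) - 48)
             else sum_odd
    pasGo chars p s (i + 2)
  else (product_even, sum_odd)
termination_by chars.length - i

def product_and_sum_alt (sequence : String) : Int × Int :=
  pasGo sequence.toList 1 0 0

-- ===== PRECONDITION & SPEC =====
def Spec_product_and_sum (sequence : String) (out : Int × Int) : Prop := out = product_and_sum_alt sequence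
instance (sequence : String) (out : Int × Int) : Decidable (Spec_product_and_sum sequence out) := by unfold Spec_product_and_sum; infer_instance

-- ===== CLAIM (what is proved, stated in full; the proofs are below) =====
def Claim_equal_product_and_sum : Prop := ∀ (sequence : String), Dom_product_and_sum sequence → Spec_product_and_sum sequence (product_and_sum sequence)

-- ===== LEMMAS AND PROOFS =====

-- structural two-at-a-time bridge used only by the proofs
def pairRec : List Char → Int → Int → Int × Int
  | [], p, s => (p, s)
  | [a], p, s =>
      ((if ((a.toNat : Int) - 48) ≠ 0 then p * ((a.toNat : Int) - 48) else p), s)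
  | a :: b :: t, p, s =>
      pairRec t
        (if ((a.toNat : Int) - 48) ≠ 0 then p * ((a.toNat : Int) - 48) else p)
        (s + ((b.toNat : Int) - 48))

theorem pasGo_eq_pairRec (chars : List Char) (i : Nat) (p s : Int) :
    pasGo chars p s i = pairRec (chars.drop i) p s := by
  by_cases h : i < chars.length
  · rw [pasGo]
    simp only [h, if_true]
    rw [List.drop_eq_getElem_cons h, List.getD_eq_getElem chars ' ' h]
    by_cases h1 : i + 1 < chars.length
    · rw [List.drop_eq_getElem_cons h1, List.getD_eq_getElem chars ' ' h1]
      simp only [h1, if_true, pairRec]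
      exact pasGo_eq_pairRec chars (i + 2) _ _
    · have hd : chars.drop (i + 1) = [] := List.drop_of_length_le (by omega)
      rw [hd]
      simp only [h1, if_false, pairRec]
      rw [pasGo_eq_pairRec chars (i + 2) _ _, List.drop_of_length_le (by omega)]
      rfl
  · rw [pasGo]
    simp only [h, if_false]
    rw [List.drop_of_length_le (by omega)]
    rfl
termination_by chars.length - i
decreasing_by all_goals omega

theorem foldA_eq_pairRec (xs : List Char) (m p s : Int) :
    (PySem.List.enumerate xs (2 * m)).foldl
      (fun (st : Int × Int) (iv : Int × Char) =>
        let value : Int := (iv.2.toNat : Int) - 48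
        if iv.1 % 2 ≠ 0 then (st.1, st.2 + value)
        else if value ≠ 0 then (st.1 * value, st.2)
        else st)
      (p, s) = pairRec xs p s := by
  match xs with
  | [] => rfl
  | [a] =>
      simp only [PySem.List.enumerate_cons, PySem.List.enumerate_nil, List.foldl, pairRec]
      have h0 : (2 * m) % 2 = 0 := Int.mul_emod_right 2 m
      simp only [h0]
      by_cases ha : ((a.toNat : Int) - 48) = 0 <;> simp [ha]
  | a :: b :: t =>
      simp only [PySem.List.enumerate_cons, List.foldl]
      have h0 : (2 * m) % 2 = 0 := Int.mul_emod_right 2 m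
      have h1 : (2 * m + 1) % 2 = 1 := by omega
      have h2 : (2 * m + 1 + 1) = 2 * (m + 1) := by ring
      by_cases ha : ((a.toNat : Int) - 48) = 0
      · simp only [h0, h1, h2, ha]
        simp only [show ¬((0:Int) ≠ 0) from by omega, if_false]
        rw [foldA_eq_pairRec t (m + 1)]
        simp [pairRec, ha]
      · simp only [h0, h1, h2, ne_eq, ha, not_false_eq_true, if_true,
          show ¬((0:Int) ≠ 0) from by omega, if_false]
        rw [foldA_eq_pairRec t (m + 1)]
        simp [pairRec, ha]

-- ===== VERDICT (by name: the statement is the Claim_ definition above) =====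
theorem product_and_sum_spec : Claim_equal_product_and_sum := by
  intro sequence _
  unfold Spec_product_and_sum product_and_sum product_and_sum_alt
  rw [pasGo_eq_pairRec sequence.toList 0 1 0, List.drop_zero]
  have := foldA_eq_pairRec sequence.toList 0 1 0
  simpa using this
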